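-- pv_equiv track=rewrite | github.com/pypi-data/pypi-mirror-399 | packages/macblock/macblock-0.2.9-py3-none-any.whl/macblock/dns_test.py | _candidate_suffixes
-- ===== SOURCE A (Python) =====
-- def _normalize_domain(domain: str) -> str:
--     return domain.strip().lower().strip(".")
--
-- def _candidate_suffixes(domain: str) -> list[str]:
--     dom = _normalize_domain(domain)
--     if not dom:
--         return []
--
--     parts = [p for p in dom.split(".") if p]
--     out: list[str] = []
--     for i in range(len(parts)):
--         suffix = ".".join(parts[i:])
--         if suffix and suffix not in out:
--             out.append(suffix)
--     return out
-- ===== SOURCE B (Python) =====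
-- def _normalize_domain(domain: str) -> str:
--     return domain.strip().lower().strip(".")
--
-- def _candidate_suffixes(domain: str) -> list[str]:
--     dom = _normalize_domain(domain)
--     if not dom:
--         return []
--     acc: list[str] = []
--     running = ""
--     for part in reversed(dom.split(".")):
--         if not part:
--             continue
--         running = part if not running else part + "." + running
--         acc.append(running)
--     acc.reverse()
--     return acc
-- ===== Notes on version B (the rewrite author's own statement) =====
-- stated objective: alternative
-- what changed: Instead of re-joining parts[i:] for every index and membership-testing against the output list, B builds each suffix incrementally right-to-left by prepending one label to a running string and reverses the collected list, dropping the dedup/non-empty guards entirely.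
import Mathlib
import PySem

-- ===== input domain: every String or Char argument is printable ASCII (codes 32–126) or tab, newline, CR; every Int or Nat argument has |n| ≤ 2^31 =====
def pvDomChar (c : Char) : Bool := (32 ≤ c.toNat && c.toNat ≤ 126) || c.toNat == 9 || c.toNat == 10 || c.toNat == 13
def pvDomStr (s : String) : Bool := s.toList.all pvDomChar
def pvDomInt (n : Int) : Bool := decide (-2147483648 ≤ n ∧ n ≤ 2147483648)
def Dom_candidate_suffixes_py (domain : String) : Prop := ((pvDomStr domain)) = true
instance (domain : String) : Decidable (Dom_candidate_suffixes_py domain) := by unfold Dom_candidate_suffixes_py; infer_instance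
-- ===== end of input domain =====

-- B builds each suffix incrementally right-to-left (one pass prepending labels to a running string)
-- instead of re-joining parts[i:] and membership-testing for every index; returns A's exact list.


-- ===== PORT A =====
-- shared helper: port of _normalize_domain (called by both Pythons verbatim)
def normalize_domain_py (domain : String) : String :=
  PySem.Str.stripChars (PySem.Str.lower (PySem.Str.strip domain)) "."

def candidate_suffixes_py (domain : String) : List String :=
  let dom := normalize_domain_py domain
  if dom = "" then []
  else
    let parts := ((PySem.Str.split? dom ".").getD []).filter (fun p => p != "")
    (PySem.List.pyRange 0 (parts.length : Int) 1).foldl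
      (fun out i =>
        let suffix := PySem.Str.join "." (PySem.List.slice parts (some i) none)
        if suffix ≠ "" ∧ suffix ∉ out then out ++ [suffix] else out) []

-- ===== PORT B =====
def candidate_suffixes_py_alt (domain : String) : List String :=
  let dom := normalize_domain_py domain
  if dom = "" then []
  else
    let st := (((PySem.Str.split? dom ".").getD []).reverse).foldl
      (fun (st : List String × String) part =>
        if part = "" then st
        else
          let running := if st.2 = "" then part else part ++ "." ++ st.2
          (st.1 ++ [running], running)) ([], "")
    st.1.reverse

-- ===== PRECONDITION & SPEC =====
def Spec_candidate_suffixes_py (domain : String) (out : List String) : Prop := out = candidate_suffixes_py_alt domain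
instance (domain : String) (out : List String) : Decidable (Spec_candidate_suffixes_py domain out) := by unfold Spec_candidate_suffixes_py; infer_instance

-- ===== CLAIM (what is proved, stated in full; the proofs are below) =====
def Claim_equal_candidate_suffixes_py : Prop := ∀ (domain : String), Dom_candidate_suffixes_py domain → Spec_candidate_suffixes_py domain (candidate_suffixes_py domain)

-- ===== LEMMAS AND PROOFS =====

-- all suffixes parts[i:].join('.') for 0 ≤ i < len, longest first
def pvSuffixes : List String → List String
  | [] => []
  | p :: rest => PySem.Str.join "." (p :: rest) :: pvSuffixes rest

theorem pv_join_nil : PySem.Str.join "." ([] : List String) = "" := by decide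

theorem pv_toList_ne_nil {s : String} (h : s ≠ "") : s.toList ≠ [] := by
  intro hc
  exact h (String.toList_inj.mp (by simpa using hc))

theorem pv_join_cons (p q : String) (t : List String) :
    PySem.Str.join "." (p :: q :: t) = p ++ "." ++ PySem.Str.join "." (q :: t) := by
  apply String.toList_inj.mp
  simp [PySem.Str.toList_join, String.toList_append, PySem.Chars.join_cons_cons]

theorem pv_jlen_lt (p : String) (rest : List String) (hp : p ≠ "") :
    (PySem.Str.join "." rest).toList.length < (PySem.Str.join "." (p :: rest)).toList.length := by
  have hlp : 0 < p.toList.length := List.length_pos_iff.mpr (pv_toList_ne_nil hp)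
  cases rest with
  | nil =>
      rw [pv_join_nil]
      have h1 : (PySem.Str.join "." [p]).toList.length = p.toList.length := by
        simp [PySem.Str.toList_join, PySem.Chars.join_singleton]
      simpa [h1] using hlp
  | cons q t =>
      rw [pv_join_cons]
      simp only [String.toList_append, List.length_append]
      have : ("." : String).toList.length = 1 := by decide
      omega

theorem pv_join_ne_empty (p : String) (rest : List String) (hp : p ≠ "") :
    PySem.Str.join "." (p :: rest) ≠ "" := by
  intro hc
  have h := pv_jlen_lt p rest hp
  rw [hc] at h
  simp at h

theorem pv_suffixes_len_le (l : List String) (h : ∀ p ∈ l, p ≠ "") :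
    ∀ s ∈ pvSuffixes l, s.toList.length ≤ (PySem.Str.join "." l).toList.length := by
  induction l with
  | nil => simp [pvSuffixes]
  | cons p rest ih =>
      intro s hs
      simp only [pvSuffixes, List.mem_cons] at hs
      rcases hs with rfl | hs
      · exact le_refl _
      · have h1 := ih (fun q hq => h q (List.mem_cons_of_mem _ hq)) s hs
        have h2 := pv_jlen_lt p rest (h p List.mem_cons_self)
        omega

theorem pv_suffixes_ne_empty (l : List String) (h : ∀ p ∈ l, p ≠ "") :
    ∀ s ∈ pvSuffixes l, s ≠ "" := by
  induction l with
  | nil => simp [pvSuffixes]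
  | cons p rest ih =>
      intro s hs
      simp only [pvSuffixes, List.mem_cons] at hs
      rcases hs with rfl | hs
      · exact pv_join_ne_empty p rest (h p List.mem_cons_self)
      · exact ih (fun q hq => h q (List.mem_cons_of_mem _ hq)) s hs

theorem pv_suffixes_nodup (l : List String) (h : ∀ p ∈ l, p ≠ "") :
    (pvSuffixes l).Nodup := by
  induction l with
  | nil => simp [pvSuffixes]
  | cons p rest ih =>
      simp only [pvSuffixes, List.nodup_cons]
      refine ⟨?_, ih (fun q hq => h q (List.mem_cons_of_mem _ hq))⟩
      intro hmem
      have hle := pv_suffixes_len_le rest (fun q hq => h q (List.mem_cons_of_mem _ hq)) _ hmem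
      have hlt := pv_jlen_lt p rest (h p List.mem_cons_self)
      omega

-- A-side: the joined slices, in range order, ARE pvSuffixes
theorem pv_map_drop_eq_suffixes (l : List String) :
    (List.range l.length).map (fun k => PySem.Str.join "." (l.drop k)) = pvSuffixes l := by
  induction l with
  | nil => simp [pvSuffixes]
  | cons p rest ih =>
      simp only [List.length_cons, List.range_succ_eq_map, List.map_cons, List.map_map]
      simp only [pvSuffixes]
      congr 1

-- A-side: the dedup/non-empty foldl over a Nodup list of non-empty strings just appends everything
theorem pv_dedup_foldl (xs : List String) : ∀ (out : List String),
    (out ++ xs).Nodup → (∀ x ∈ xs, x ≠ "") →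
    xs.foldl (fun out s => if s ≠ "" ∧ s ∉ out then out ++ [s] else out) out = out ++ xs := by
  induction xs with
  | nil => intro out _ _; simp
  | cons x xs ih =>
      intro out hnd hne
      have hx : x ≠ "" := hne x List.mem_cons_self
      have hxout : x ∉ out := by
        rw [List.nodup_append] at hnd
        intro hc
        exact hnd.2.2 x hc x List.mem_cons_self rfl
      simp only [List.foldl_cons]
      rw [if_pos (show x ≠ "" ∧ x ∉ out from ⟨hx, hxout⟩)]
      rw [ih (out ++ [x]) (by simpa using hnd) (fun q hq => hne q (List.mem_cons_of_mem _ hq))]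
      simp

-- A-side: range(len(parts)) as a Nat range
theorem pv_range_cast (n : Nat) :
    PySem.List.pyRange 0 (n : Int) 1 = (List.range n).map (fun k : Nat => (k : Int)) := by
  rw [PySem.List.pyRange_of_pos 0 (n : Int) (by norm_num)]
  have h1 : ((n : Int) - 0 + 1 - 1) / 1 = (n : Int) := by norm_num
  by_cases h0 : (0 : Int) < (n : Int)
  · rw [if_pos h0, h1]
    simp
  · rw [if_neg h0]
    have hn : n = 0 := by omega
    simp [hn]

-- A's whole loop computes pvSuffixes
theorem pv_Aside (parts : List String) (hne : ∀ p ∈ parts, p ≠ "") :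
    (PySem.List.pyRange 0 (parts.length : Int) 1).foldl
      (fun out i =>
        let suffix := PySem.Str.join "." (PySem.List.slice parts (some i) none)
        if suffix ≠ "" ∧ suffix ∉ out then out ++ [suffix] else out) [] = pvSuffixes parts := by
  rw [pv_range_cast, List.foldl_map]
  simp only [PySem.List.slice_from_natCast]
  have hmap : ((List.range parts.length).map (fun k => PySem.Str.join "." (parts.drop k))).foldl
      (fun (out : List String) s => if s ≠ "" ∧ s ∉ out then out ++ [s] else out) []
      = pvSuffixes parts := by
    rw [pv_map_drop_eq_suffixes]
    have hnd : (pvSuffixes parts).Nodup := pv_suffixes_nodup parts hne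
    have := pv_dedup_foldl (pvSuffixes parts) [] (by simpa using hnd)
      (pv_suffixes_ne_empty parts hne)
    simpa using this
  exact ((List.foldl_map (f := fun k => PySem.Str.join "." (parts.drop k))
    (g := fun (out : List String) s => if s ≠ "" ∧ s ∉ out then out ++ [s] else out)
    (l := List.range parts.length) (init := [])).symm).trans hmap

-- B-side: the right-to-left foldr characterisation
theorem pv_bfold (l : List String) :
    l.foldr (fun part st =>
        if part = "" then st
        else
          let running := if st.2 = "" then part else part ++ "." ++ st.2
          (st.1 ++ [running], running)) (([] : List String), "")
      = ((pvSuffixes (l.filter (fun p => p != ""))).reverse,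
         PySem.Str.join "." (l.filter (fun p => p != ""))) := by
  induction l with
  | nil => simp [pvSuffixes, pv_join_nil]
  | cons p rest ih =>
      by_cases hp : p = ""
      · subst hp
        simpa using ih
      · have hf : (p :: rest).filter (fun p => p != "") = p :: rest.filter (fun p => p != "") := by
          simp [hp]
        rw [List.foldr_cons, ih, hf]
        simp only [if_neg hp]
        cases hfl : rest.filter (fun p => p != "") with
        | nil =>
            have h1 : PySem.Str.join "." [p] = p := by
              apply String.toList_inj.mp
              simp [PySem.Str.toList_join, PySem.Chars.join_singleton]
            simp [pvSuffixes, pv_join_nil, h1]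
        | cons q t =>
            have hq : q ≠ "" := by
              have hm : q ∈ rest.filter (fun p => p != "") := by simp [hfl]
              simpa using List.of_mem_filter hm
            have hjoin : PySem.Str.join "." (q :: t) ≠ "" := pv_join_ne_empty q t hq
            simp only [if_neg hjoin, pvSuffixes]
            rw [pv_join_cons]
            simp

theorem pv_filter_ne_empty (l : List String) :
    ∀ p ∈ l.filter (fun p => p != ""), p ≠ "" := by
  intro p hp
  simpa using List.of_mem_filter hp

-- ===== VERDICT (by name: the statement is the Claim_ definition above) =====
theorem candidate_suffixes_py_spec : Claim_equal_candidate_suffixes_py := by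
  intro domain _
  unfold Spec_candidate_suffixes_py candidate_suffixes_py candidate_suffixes_py_alt
  by_cases hd : normalize_domain_py domain = ""
  · simp [hd]
  · simp only [if_neg hd]
    rw [pv_Aside _ (pv_filter_ne_empty _), List.foldl_reverse, pv_bfold]
    simp
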